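-- pv_equiv track=rewrite | github.com/atm1992/LeetCode_in_Python3 | weekly_contest/298/a2312_selling_pieces_of_wood.py | sellingWood
-- ===== SOURCE A (Python) =====
-- from typing import List
--
-- def sellingWood(m: int, n: int, prices: List[List[int]]) -> int:
--     """
--     动态规划
--     dp[i][j] 表示将一块高i、宽j的木块，切割后能得到的最多钱数。最终答案为dp[m][n]
--     分为3种切割方式：
--     1、不切割，直接售卖，如果prices中存在的话，不存在的话，价格算作0
--     2、水平切割，将高i切分为k和i-k，此时 dp[i][j] = max(dp[k][j] + dp[i-k][j])，1 <= k <= i-1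
--     3、垂直切割，将宽j切分为k和j-k，此时 dp[i][j] = max(dp[i][k] + dp[i][j-k])，1 <= k <= j-1
--     上述3种情况取最大值，即为最终的 dp[i][j]
--     """
--     shape2price = {(h, w): p for h, w, p in prices}
--     dp = [[0] * (n + 1) for _ in range(m + 1)]
--     for i in range(1, m + 1):
--         for j in range(1, n + 1):
--             r1 = shape2price.get((i, j), 0)
--             r2 = 0
--             for k in range(1, i):
--                 r2 = max(r2, dp[k][j] + dp[i - k][j])
--             r3 = 0
--             for k in range(1, j):
--                 r3 = max(r3, dp[i][k] + dp[i][j - k])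
--             dp[i][j] = max(r1, r2, r3)
--     return dp[-1][-1]
-- ===== SOURCE B (Python) =====
-- def sellingWood(m, n, prices):
--     shape2price = {(h, w): p for h, w, p in prices}
--     memo = {}
--
--     def best(i, j):
--         if i <= 0 or j <= 0:
--             return 0
--         if (i, j) in memo:
--             return memo[(i, j)]
--         r = max(shape2price.get((i, j), 0), 0)
--         for k in range(1, i):
--             r = max(r, best(k, j) + best(i - k, j))
--         for k in range(1, j):
--             r = max(r, best(i, k) + best(i, j - k))
--         memo[(i, j)] = r
--         return r
--
--     return best(m, n)
-- ===== Notes on version B (the rewrite author's own statement) =====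
-- stated objective: alternative
-- what changed: Replaces A's bottom-up row-major dp table (nested index loops over a 2-D list) with a demand-driven top-down memoized recursion best(i,j) over a dict memo; the not-sold base value is written as max(price,0) instead of A's separate r2/r3 accumulators floored at 0.
import Mathlib
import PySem

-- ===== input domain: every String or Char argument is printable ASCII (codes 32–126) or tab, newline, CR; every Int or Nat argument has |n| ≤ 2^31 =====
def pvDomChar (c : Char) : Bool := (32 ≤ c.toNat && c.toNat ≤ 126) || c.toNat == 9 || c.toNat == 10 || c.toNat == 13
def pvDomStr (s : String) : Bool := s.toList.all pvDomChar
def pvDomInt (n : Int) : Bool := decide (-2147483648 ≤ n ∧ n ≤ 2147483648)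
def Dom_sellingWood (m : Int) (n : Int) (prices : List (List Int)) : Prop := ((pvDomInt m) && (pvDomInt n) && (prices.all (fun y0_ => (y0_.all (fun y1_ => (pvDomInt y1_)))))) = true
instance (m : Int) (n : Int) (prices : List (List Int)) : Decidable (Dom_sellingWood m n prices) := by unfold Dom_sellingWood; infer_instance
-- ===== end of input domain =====

-- B replaces A's bottom-up row-major dp table with a demand-driven memoized recursion best(i,j);
-- objective: alternative decomposition (same asymptotic cost). Equivalence of the RETURN value.

-- ===== PORT A =====
-- shared helper: shape2price = {(h, w): p for h, w, p in prices}
-- (Python raises ValueError on a row whose length is not 3; Pre_ excludes those, the fallback branch is never reached inside Pre_)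
def spOf (prices : List (List Int)) : PySem.Dict (Int × Int) Int :=
  prices.foldl (fun d row =>
    match row with
    | [h, w, p] => d.insert (h, w) p
    | _ => d) PySem.Dict.empty

-- dp[a][b]; every read A performs is in range under Pre_, so the defaults are never used
def getA (dp : List (List Int)) (a b : Int) : Int :=
  PySem.List.pyGetD (PySem.List.pyGetD dp a []) b 0

-- dp[a][b] = v; the indices A writes are in range under Pre_, so pySetD is exact here
def setA (dp : List (List Int)) (a b : Int) (v : Int) : List (List Int) :=
  PySem.List.pySetD dp a (PySem.List.pySetD (PySem.List.pyGetD dp a []) b v)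

def cellA (sp : PySem.Dict (Int × Int) Int) (dp : List (List Int)) (i j : Int) : Int :=
  let r1 := sp.getD (i, j) 0
  let r2 := (PySem.List.pyRange 1 i 1).foldl (fun r k => max r (getA dp k j + getA dp (i - k) j)) 0
  let r3 := (PySem.List.pyRange 1 j 1).foldl (fun r k => max r (getA dp i k + getA dp i (j - k))) 0
  max (max r1 r2) r3

def sellingWood (m : Int) (n : Int) (prices : List (List Int)) : Int :=
  let sp := spOf prices
  let dp0 : List (List Int) := (PySem.List.pyRange 0 (m + 1) 1).map (fun _ => PySem.List.pyRepeat [(0 : Int)] (n + 1))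
  let dp := (PySem.List.pyRange 1 (m + 1) 1).foldl (fun dp i =>
    (PySem.List.pyRange 1 (n + 1) 1).foldl (fun dp j =>
      setA dp i j (cellA sp dp i j)) dp) dp0
  -- dp[-1][-1]; nonempty under Pre_ (0 ≤ m, 0 ≤ n), so the defaults are never used
  PySem.List.pyGetD (PySem.List.pyGetD dp (-1) []) (-1) 0

-- ===== PORT B =====
-- memoized recursion; the mutable memo dict of Source B is threaded through explicitly
def bestB (sp : PySem.Dict (Int × Int) Int) (i j : Int)
    (memo : PySem.Dict (Int × Int) Int) : Int × PySem.Dict (Int × Int) Int :=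
  if i ≤ 0 ∨ j ≤ 0 then (0, memo)
  else
    match memo.get? (i, j) with
    | some v => (v, memo)
    | none =>
      let s1 := (PySem.List.pyRange 1 i 1).attach.foldl
        (fun rm kk =>
          let p1 := bestB sp kk.1 j rm.2
          let p2 := bestB sp (i - kk.1) j p1.2
          (max rm.1 (p1.1 + p2.1), p2.2))
        (max (sp.getD (i, j) 0) 0, memo)
      let s2 := (PySem.List.pyRange 1 j 1).attach.foldl
        (fun rm kk =>
          let p1 := bestB sp i kk.1 rm.2
          let p2 := bestB sp i (j - kk.1) p1.2
          (max rm.1 (p1.1 + p2.1), p2.2))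
        s1
      (s2.1, s2.2.insert (i, j) s2.1)
termination_by (i.toNat + j.toNat)
decreasing_by
  all_goals (have h := kk.2; rw [PySem.List.mem_pyRange_one] at h; omega)

def sellingWood_alt (m : Int) (n : Int) (prices : List (List Int)) : Int :=
  let shape2price := spOf prices
  (bestB shape2price m n PySem.Dict.empty).1

-- ===== PRECONDITION & SPEC =====
-- Pre_ excludes exactly the inputs where the Python A raises: negative m or n (dp[-1][-1] on an
-- empty table → IndexError) and price rows whose length is not 3 (unpacking → ValueError).
def Pre_sellingWood (m : Int) (n : Int) (prices : List (List Int)) : Prop :=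
  0 ≤ m ∧ 0 ≤ n ∧ prices.all (fun r => r.length == 3) = true
instance (m : Int) (n : Int) (prices : List (List Int)) : Decidable (Pre_sellingWood m n prices) := by
  unfold Pre_sellingWood; infer_instance

def pvWitness_sellingWood : Int × Int × List (List Int) := (3, 4, [[1, 2, 5], [2, 2, 7], [3, 4, 9]])

def Spec_sellingWood (m : Int) (n : Int) (prices : List (List Int)) (out : Int) : Prop := out = sellingWood_alt m n prices
instance (m : Int) (n : Int) (prices : List (List Int)) (out : Int) : Decidable (Spec_sellingWood m n prices out) := by unfold Spec_sellingWood; infer_instance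

-- ===== CLAIM (what is proved, stated in full; the proofs are below) =====
def Claim_equal_sellingWood : Prop := ∀ (m : Int) (n : Int) (prices : List (List Int)), Dom_sellingWood m n prices → Pre_sellingWood m n prices → Spec_sellingWood m n prices (sellingWood m n prices)

-- ===== LEMMAS AND PROOFS =====

-- the pure value both programs compute (proof-only)
def bestP (sp : PySem.Dict (Int × Int) Int) (i j : Int) : Int :=
  if i ≤ 0 ∨ j ≤ 0 then 0
  else
    let r1 := (PySem.List.pyRange 1 i 1).attach.foldl
      (fun r kk => max r (bestP sp kk.1 j + bestP sp (i - kk.1) j))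
      (max (sp.getD (i, j) 0) 0)
    (PySem.List.pyRange 1 j 1).attach.foldl
      (fun r kk => max r (bestP sp i kk.1 + bestP sp i (j - kk.1))) r1
termination_by (i.toNat + j.toNat)
decreasing_by
  all_goals (have h := kk.2; rw [PySem.List.mem_pyRange_one] at h; omega)

-- generic fold-of-max facts
theorem foldl_max_init {α : Type} (l : List α) (g : α → Int) (a b : Int) :
    l.foldl (fun r k => max r (g k)) (max a b) = max a (l.foldl (fun r k => max r (g k)) b) := by
  induction l generalizing a b with
  | nil => simp
  | cons x xs ih => simp only [List.foldl_cons, max_assoc]; exact ih ..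

theorem foldl_max_le_init {α : Type} (l : List α) (g : α → Int) (b : Int) :
    b ≤ l.foldl (fun r k => max r (g k)) b := by
  induction l generalizing b with
  | nil => simp
  | cons x xs ih => exact le_trans (le_max_left _ _) (ih _)

-- ---------- B side: the memoized recursion computes bestP ----------
def MemoOk (sp memo : PySem.Dict (Int × Int) Int) : Prop :=
  ∀ p v, memo.get? p = some v → v = bestP sp p.1 p.2

theorem bestB_fold_auxH (sp : PySem.Dict (Int × Int) Int) (N : Nat)
    (IH : ∀ i j, i.toNat + j.toNat < N → ∀ memo, MemoOk sp memo →
      (bestB sp i j memo).1 = bestP sp i j ∧ MemoOk sp (bestB sp i j memo).2)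
    (i j : Int) (hij : i.toNat + j.toNat ≤ N) :
    ∀ (l : List {x // x ∈ PySem.List.pyRange 1 i 1}) (r : Int) (memo : PySem.Dict (Int × Int) Int),
      MemoOk sp memo →
    ∃ memo', l.foldl (fun rm kk =>
        (max rm.1 ((bestB sp kk.1 j rm.2).1 + (bestB sp (i - kk.1) j (bestB sp kk.1 j rm.2).2).1),
          (bestB sp (i - kk.1) j (bestB sp kk.1 j rm.2).2).2)) (r, memo)
      = (l.foldl (fun r kk => max r (bestP sp kk.1 j + bestP sp (i - kk.1) j)) r, memo')
      ∧ MemoOk sp memo' := by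
  intro l
  induction l with
  | nil => exact fun r memo h => ⟨memo, rfl, h⟩
  | cons kk l ih =>
    intro r memo hok
    have hb := kk.2
    rw [PySem.List.mem_pyRange_one] at hb
    have h1 := IH kk.1 j (by omega) memo hok
    have h2 := IH (i - kk.1) j (by omega) (bestB sp kk.1 j memo).2 h1.2
    obtain ⟨memo', heq, hok'⟩ := ih
      (max r ((bestB sp kk.1 j memo).1 + (bestB sp (i - kk.1) j (bestB sp kk.1 j memo).2).1))
      (bestB sp (i - kk.1) j (bestB sp kk.1 j memo).2).2 h2.2
    refine ⟨memo', ?_, hok'⟩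
    simp only [List.foldl_cons]
    rw [heq, h1.1, h2.1]

theorem bestB_fold_auxV (sp : PySem.Dict (Int × Int) Int) (N : Nat)
    (IH : ∀ i j, i.toNat + j.toNat < N → ∀ memo, MemoOk sp memo →
      (bestB sp i j memo).1 = bestP sp i j ∧ MemoOk sp (bestB sp i j memo).2)
    (i j : Int) (hij : i.toNat + j.toNat ≤ N) :
    ∀ (l : List {x // x ∈ PySem.List.pyRange 1 j 1}) (r : Int) (memo : PySem.Dict (Int × Int) Int),
      MemoOk sp memo →
    ∃ memo', l.foldl (fun rm kk =>
        (max rm.1 ((bestB sp i kk.1 rm.2).1 + (bestB sp i (j - kk.1) (bestB sp i kk.1 rm.2).2).1),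
          (bestB sp i (j - kk.1) (bestB sp i kk.1 rm.2).2).2)) (r, memo)
      = (l.foldl (fun r kk => max r (bestP sp i kk.1 + bestP sp i (j - kk.1))) r, memo')
      ∧ MemoOk sp memo' := by
  intro l
  induction l with
  | nil => exact fun r memo h => ⟨memo, rfl, h⟩
  | cons kk l ih =>
    intro r memo hok
    have hb := kk.2
    rw [PySem.List.mem_pyRange_one] at hb
    have h1 := IH i kk.1 (by omega) memo hok
    have h2 := IH i (j - kk.1) (by omega) (bestB sp i kk.1 memo).2 h1.2
    obtain ⟨memo', heq, hok'⟩ := ih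
      (max r ((bestB sp i kk.1 memo).1 + (bestB sp i (j - kk.1) (bestB sp i kk.1 memo).2).1))
      (bestB sp i (j - kk.1) (bestB sp i kk.1 memo).2).2 h2.2
    refine ⟨memo', ?_, hok'⟩
    simp only [List.foldl_cons]
    rw [heq, h1.1, h2.1]

theorem bestB_eq (sp : PySem.Dict (Int × Int) Int) :
    ∀ (N : Nat) (i j : Int), i.toNat + j.toNat < N → ∀ memo, MemoOk sp memo →
      (bestB sp i j memo).1 = bestP sp i j ∧ MemoOk sp (bestB sp i j memo).2 := by
  intro N
  induction N with
  | zero => omega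
  | succ N ih =>
    intro i j hlt memo hok
    rw [bestB]
    by_cases hbase : i ≤ 0 ∨ j ≤ 0
    · rw [if_pos hbase]
      exact ⟨by rw [bestP, if_pos hbase], hok⟩
    · rw [if_neg hbase]
      cases hget : memo.get? (i, j) with
      | some v =>
        exact ⟨hok (i, j) v hget, hok⟩
      | none =>
        obtain ⟨memo1, heq1, hok1⟩ := bestB_fold_auxH sp N ih i j (by omega)
          (PySem.List.pyRange 1 i 1).attach (max (sp.getD (i, j) 0) 0) memo hok
        obtain ⟨memo2, heq2, hok2⟩ := bestB_fold_auxV sp N ih i j (by omega)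
          (PySem.List.pyRange 1 j 1).attach
          ((PySem.List.pyRange 1 i 1).attach.foldl
            (fun r kk => max r (bestP sp kk.1 j + bestP sp (i - kk.1) j))
            (max (sp.getD (i, j) 0) 0)) memo1 hok1
        rw [heq1]
        simp only [heq2]
        have hval : (PySem.List.pyRange 1 j 1).attach.foldl
            (fun r kk => max r (bestP sp i kk.1 + bestP sp i (j - kk.1)))
            ((PySem.List.pyRange 1 i 1).attach.foldl
              (fun r kk => max r (bestP sp kk.1 j + bestP sp (i - kk.1) j))
              (max (sp.getD (i, j) 0) 0)) = bestP sp i j := by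
          rw [bestP, if_neg hbase]
        refine ⟨hval, ?_⟩
        intro p v hv
        rw [PySem.Dict.get?_insert] at hv
        split at hv
        · cases hv
          rename_i hp
          subst hp
          exact hval
        · exact hok2 p v hv

theorem alt_eq_bestP (m n : Int) (prices : List (List Int)) :
    sellingWood_alt m n prices = bestP (spOf prices) m n := by
  unfold sellingWood_alt
  exact (bestB_eq (spOf prices) (m.toNat + n.toNat + 1) m n (by omega) PySem.Dict.empty
    (fun p v hv => by simp [PySem.Dict.get?_empty] at hv)).1

-- ---------- A side: the dp table is filled with bestP values ----------
def TabInv (sp : PySem.Dict (Int × Int) Int) (m n : Int) (dp : List (List Int)) (i j : Int) : Prop :=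
  dp.length = (m + 1).toNat ∧
  (∀ row ∈ dp, row.length = (n + 1).toNat) ∧
  ∀ a b : Int, 0 ≤ a → a ≤ m → 0 ≤ b → b ≤ n →
    getA dp a b = if 1 ≤ a ∧ 1 ≤ b ∧ (a < i ∨ (a = i ∧ b < j)) then bestP sp a b else 0

theorem max_fold_algebra {α β : Type} (l1 : List α) (l2 : List β) (g1 : α → Int) (g2 : β → Int)
    (p : Int) :
    l2.foldl (fun r k => max r (g2 k)) (l1.foldl (fun r k => max r (g1 k)) (max p 0))
      = max (max p (l1.foldl (fun r k => max r (g1 k)) 0)) (l2.foldl (fun r k => max r (g2 k)) 0) := by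
  rw [foldl_max_init, foldl_max_init]
  conv_lhs => rw [show l1.foldl (fun r k => max r (g1 k)) 0
      = max (l1.foldl (fun r k => max r (g1 k)) 0) 0 from (max_eq_left (foldl_max_le_init ..)).symm,
    foldl_max_init]
  exact (max_assoc ..).symm

theorem cell_eq (sp : PySem.Dict (Int × Int) Int) (m n : Int) (dp : List (List Int)) (i j : Int)
    (hInv : TabInv sp m n dp i j) (hi1 : 1 ≤ i) (him : i ≤ m) (hj1 : 1 ≤ j) (hjn : j ≤ n) :
    cellA sp dp i j = bestP sp i j := by
  obtain ⟨hlen, hrows, hval⟩ := hInv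
  have hb : ¬(i ≤ 0 ∨ j ≤ 0) := by omega
  have h2 : (PySem.List.pyRange 1 i 1).foldl (fun r k => max r (getA dp k j + getA dp (i - k) j)) 0
      = (PySem.List.pyRange 1 i 1).foldl (fun r k => max r (bestP sp k j + bestP sp (i - k) j)) 0 := by
    apply PySem.List.foldl_congr_mem'
    intro k hk r
    rw [PySem.List.mem_pyRange_one] at hk
    rw [hval k j (by omega) (by omega) (by omega) (by omega),
        hval (i - k) j (by omega) (by omega) (by omega) (by omega),
        if_pos ⟨by omega, by omega, Or.inl (by omega)⟩,
        if_pos ⟨by omega, by omega, Or.inl (by omega)⟩]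
  have h3 : (PySem.List.pyRange 1 j 1).foldl (fun r k => max r (getA dp i k + getA dp i (j - k))) 0
      = (PySem.List.pyRange 1 j 1).foldl (fun r k => max r (bestP sp i k + bestP sp i (j - k))) 0 := by
    apply PySem.List.foldl_congr_mem'
    intro k hk r
    rw [PySem.List.mem_pyRange_one] at hk
    rw [hval i k (by omega) (by omega) (by omega) (by omega),
        hval i (j - k) (by omega) (by omega) (by omega) (by omega),
        if_pos ⟨by omega, by omega, Or.inr ⟨rfl, by omega⟩⟩,
        if_pos ⟨by omega, by omega, Or.inr ⟨rfl, by omega⟩⟩]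
  simp only [cellA]
  conv_rhs => rw [bestP]
  rw [if_neg hb,
    List.foldl_attach (f := fun (r k : Int) => max r (bestP sp k j + bestP sp (i - k) j)),
    List.foldl_attach (f := fun (r k : Int) => max r (bestP sp i k + bestP sp i (j - k))),
    max_fold_algebra, h2, h3]

theorem set_preserves (sp : PySem.Dict (Int × Int) Int) (m n : Int) (dp : List (List Int)) (i j : Int)
    (hInv : TabInv sp m n dp i j) (hm : 0 ≤ m) (hn : 0 ≤ n)
    (hi1 : 1 ≤ i) (him : i ≤ m) (hj1 : 1 ≤ j) (hjn : j ≤ n) :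
    TabInv sp m n (setA dp i j (bestP sp i j)) i (j + 1) := by
  obtain ⟨hlen, hrows, hval⟩ := hInv
  have hrng : PySem.Raise.InRange dp.length i := by
    simp [PySem.Raise.InRange]; omega
  have hrowmem : PySem.List.pyGetD dp i [] ∈ dp := PySem.List.pyGetD_mem dp [] hrng
  have hrowlen : (PySem.List.pyGetD dp i []).length = (n + 1).toNat := hrows _ hrowmem
  have hset : setA dp i j (bestP sp i j)
      = dp.set i.toNat ((PySem.List.pyGetD dp i []).set j.toNat (bestP sp i j)) := by
    simp only [setA]
    rw [PySem.List.pySetD_of_nonneg _ _ (by omega), PySem.List.pySetD_of_nonneg _ _ (by omega)]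
  rw [hset]
  refine ⟨by simpa using hlen, ?_, ?_⟩
  · intro row hrow
    rcases List.mem_or_eq_of_mem_set hrow with h | h
    · exact hrows _ h
    · subst h; simpa using hrowlen
  · intro a b ha ham hb hbn
    have hth := hval a b ha ham hb hbn
    unfold getA at hth ⊢
    rw [PySem.List.pyGetD_eq_getElem
        (dp.set i.toNat ((PySem.List.pyGetD dp i []).set j.toNat (bestP sp i j))) []
        (by omega) (by simp only [List.length_set]; omega),
      List.getElem_set]
    by_cases hia : i.toNat = a.toNat
    · have haeq : a = i := by omega
      subst haeq
      rw [if_pos hia]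
      rw [PySem.List.pyGetD_eq_getElem ((PySem.List.pyGetD dp a []).set j.toNat (bestP sp a j)) 0
        hb (by simp only [List.length_set, hrowlen]; omega), List.getElem_set]
      by_cases hjb : j.toNat = b.toNat
      · have hbeq : b = j := by omega
        subst hbeq
        rw [if_pos hjb, if_pos ⟨by omega, by omega, Or.inr ⟨rfl, by omega⟩⟩]
      · rw [if_neg hjb]
        rw [PySem.List.pyGetD_eq_getElem (PySem.List.pyGetD dp a []) 0 hb
          (by simp only [hrowlen]; omega)] at hth
        rw [hth]
        by_cases hd : 1 ≤ a ∧ 1 ≤ b ∧ (a < a ∨ a = a ∧ b < j)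
        · rw [if_pos hd, if_pos ⟨hd.1, hd.2.1, by
            rcases hd.2.2 with h | h
            · omega
            · exact Or.inr ⟨rfl, by omega⟩⟩]
        · rw [if_neg hd, if_neg (by
            intro hc
            exact hd ⟨hc.1, hc.2.1, by
              rcases hc.2.2 with h | h
              · omega
              · exact Or.inr ⟨rfl, by omega⟩⟩)]
    · rw [if_neg hia]
      rw [PySem.List.pyGetD_eq_getElem dp [] ha (by omega)] at hth
      rw [hth]
      by_cases hd : 1 ≤ a ∧ 1 ≤ b ∧ (a < i ∨ a = i ∧ b < j)
      · rw [if_pos hd, if_pos ⟨hd.1, hd.2.1, by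
          rcases hd.2.2 with h | h
          · exact Or.inl h
          · omega⟩]
      · rw [if_neg hd, if_neg (by
          intro hc
          exact hd ⟨hc.1, hc.2.1, by
            rcases hc.2.2 with h | h
            · exact Or.inl h
            · omega⟩)]

theorem inner_aux (sp : PySem.Dict (Int × Int) Int) (m n : Int) (i : Int)
    (hm : 0 ≤ m) (hn : 0 ≤ n) (hi1 : 1 ≤ i) (him : i ≤ m) :
    ∀ (c : Nat) (j : Int) (dp : List (List Int)), 1 ≤ j → j + c = n + 1 → TabInv sp m n dp i j →
    TabInv sp m n ((PySem.List.pyRange j (n + 1) 1).foldl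
      (fun dp j => setA dp i j (cellA sp dp i j)) dp) i (n + 1) := by
  intro c
  induction c with
  | zero =>
    intro j dp hj1 hjc hInv
    rw [PySem.List.pyRange_one_eq_nil (by omega)]
    simp only [List.foldl_nil]
    exact (by omega : j = n + 1) ▸ hInv
  | succ c ih =>
    intro j dp hj1 hjc hInv
    rw [PySem.List.pyRange_one_cons (by omega)]
    simp only [List.foldl_cons]
    rw [cell_eq sp m n dp i j hInv (by omega) him (by omega) (by omega)]
    exact ih (j + 1) _ (by omega) (by omega)
      (set_preserves sp m n dp i j ⟨hInv.1, hInv.2.1, hInv.2.2⟩ hm hn (by omega) him (by omega) (by omega))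

theorem shift_inv (sp : PySem.Dict (Int × Int) Int) (m n : Int) (dp : List (List Int)) (i : Int)
    (h : TabInv sp m n dp i (n + 1)) : TabInv sp m n dp (i + 1) 1 := by
  obtain ⟨h1, h2, h3⟩ := h
  refine ⟨h1, h2, ?_⟩
  intro a b ha ham hb hbn
  rw [h3 a b ha ham hb hbn]
  exact if_congr (by omega) rfl rfl

theorem outer_aux (sp : PySem.Dict (Int × Int) Int) (m n : Int)
    (hm : 0 ≤ m) (hn : 0 ≤ n) :
    ∀ (c : Nat) (i : Int) (dp : List (List Int)), 1 ≤ i → i + c = m + 1 → TabInv sp m n dp i 1 →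
    TabInv sp m n ((PySem.List.pyRange i (m + 1) 1).foldl (fun dp i =>
      (PySem.List.pyRange 1 (n + 1) 1).foldl
        (fun dp j => setA dp i j (cellA sp dp i j)) dp) dp) (m + 1) 1 := by
  intro c
  induction c with
  | zero =>
    intro i dp hi1 hic hInv
    rw [PySem.List.pyRange_one_eq_nil (a := i) (b := m + 1) (by omega)]
    simp only [List.foldl_nil]
    exact (by omega : i = m + 1) ▸ hInv
  | succ c ih =>
    intro i dp hi1 hic hInv
    rw [PySem.List.pyRange_one_cons (a := i) (b := m + 1) (by omega)]
    simp only [List.foldl_cons]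
    exact ih (i + 1) _ (by omega) (by omega)
      (shift_inv sp m n _ i
        (inner_aux sp m n i hm hn hi1 (by omega) n.toNat 1 dp (by omega) (by omega) hInv))

theorem pyGetD_zero_of_all (xs : List Int) (h : ∀ y ∈ xs, y = 0) (b : Int) :
    PySem.List.pyGetD xs b 0 = 0 := by
  by_cases hr : PySem.Raise.InRange xs.length b
  · exact h _ (PySem.List.pyGetD_mem xs 0 hr)
  · exact PySem.List.pyGetD_of_none _ _ _ ((PySem.List.pyGet?_eq_none_iff _ _).mpr hr)

theorem init_inv (sp : PySem.Dict (Int × Int) Int) (m n : Int) (hm : 0 ≤ m) (hn : 0 ≤ n) :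
    TabInv sp m n ((PySem.List.pyRange 0 (m + 1) 1).map (fun _ => PySem.List.pyRepeat [(0 : Int)] (n + 1))) 1 1 := by
  refine ⟨?_, ?_, ?_⟩
  · simp [PySem.List.length_pyRange_one]
  · intro row hrow
    simp only [List.mem_map] at hrow
    obtain ⟨_, _, hr⟩ := hrow
    rw [← hr, PySem.List.pyRepeat_singleton]
    simp
  · intro a b ha ham hb hbn
    rw [if_neg (by omega)]
    unfold getA
    have hrow0 : ∀ y ∈ PySem.List.pyGetD
        ((PySem.List.pyRange 0 (m + 1) 1).map (fun _ => PySem.List.pyRepeat [(0 : Int)] (n + 1))) a [],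
        y = (0 : Int) := by
      intro y hy
      by_cases hr : PySem.Raise.InRange
          ((PySem.List.pyRange 0 (m + 1) 1).map (fun _ => PySem.List.pyRepeat [(0 : Int)] (n + 1))).length a
      · have hmem := PySem.List.pyGetD_mem
          ((PySem.List.pyRange 0 (m + 1) 1).map (fun _ => PySem.List.pyRepeat [(0 : Int)] (n + 1))) [] hr
        simp only [List.mem_map] at hmem
        obtain ⟨_, _, heq⟩ := hmem
        rw [← heq, PySem.List.pyRepeat_singleton] at hy
        exact List.eq_of_mem_replicate hy
      · rw [PySem.List.pyGetD_of_none _ _ _ ((PySem.List.pyGet?_eq_none_iff _ _).mpr hr)] at hy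
        cases hy
    exact pyGetD_zero_of_all _ hrow0 b

theorem a_eq_bestP (m n : Int) (prices : List (List Int)) (hm : 0 ≤ m) (hn : 0 ≤ n) :
    sellingWood m n prices = bestP (spOf prices) m n := by
  simp only [sellingWood]
  have hfin := outer_aux (spOf prices) m n hm hn m.toNat 1 _ (by omega) (by omega)
    (init_inv (spOf prices) m n hm hn)
  obtain ⟨hlen, hrows, hval⟩ := hfin
  set dpF := (PySem.List.pyRange 1 (m + 1) 1).foldl (fun dp i =>
    (PySem.List.pyRange 1 (n + 1) 1).foldl
      (fun dp j => setA dp i j (cellA (spOf prices) dp i j)) dp)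
    ((PySem.List.pyRange 0 (m + 1) 1).map (fun _ => PySem.List.pyRepeat [(0 : Int)] (n + 1)))
    with hdpF
  clear hdpF
  clear_value dpF
  rw [PySem.List.pyGetD_neg_ofNat dpF 1 [] (by omega) (by omega)]
  simp only [show dpF.length - 1 = m.toNat from by omega]
  have hrlen : dpF[m.toNat].length = (n + 1).toNat := hrows _ (by
    exact List.getElem_mem (by omega))
  rw [PySem.List.pyGetD_neg_ofNat dpF[m.toNat] 1 0 (by omega) (by omega)]
  simp only [show dpF[m.toNat].length - 1 = n.toNat from by omega]
  have hg := hval m n hm le_rfl hn le_rfl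
  unfold getA at hg
  rw [PySem.List.pyGetD_eq_getElem dpF [] hm (by omega)] at hg
  rw [PySem.List.pyGetD_eq_getElem dpF[m.toNat] 0 hn (by simp only [hrlen]; omega)] at hg
  rw [hg]
  by_cases hmn : 1 ≤ m ∧ 1 ≤ n
  · rw [if_pos ⟨hmn.1, hmn.2, Or.inl (by omega)⟩]
  · rw [if_neg (by intro hc; exact hmn ⟨hc.1, hc.2.1⟩), bestP, if_pos (by omega)]

-- ===== VERDICT (by name: the statement is the Claim_ definition above) =====
theorem sellingWood_spec : Claim_equal_sellingWood := by
  intro m n prices _ hpre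
  show _ = _
  rw [a_eq_bestP m n prices hpre.1 hpre.2.1, alt_eq_bestP]
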